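-- pv_equiv track=rewrite | github.com/fblbleng/long_reads_BD_Rhapsody | scripts/Barcodes_UMI_extractor.py | has_polyA_or_polyT_tail
-- ===== SOURCE A (Python) =====
-- def has_polyA_or_polyT_tail(seq, threshold=8):
--     return (
--         any(seq[i:i+threshold].count("A") >= threshold for i in range(len(seq) - threshold + 1)) or
--         any(seq[i:i+threshold].count("T") >= threshold for i in range(len(seq) - threshold + 1)))
--     tail = seq[-scan_region:].upper()
--     polyA_count = max(tail[i:i+threshold].count("A") for i in range(len(tail) - threshold + 1))
--     polyT_count = max(tail[i:i+threshold].count("T") for i in range(len(tail) - threshold + 1))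
--     return polyA_count >= threshold or polyT_count >= threshold
-- ===== SOURCE B (Python) =====
-- def has_polyA_or_polyT_tail(seq, threshold=8):
--     # A window of `threshold` characters contains >= threshold 'A's (or 'T's)
--     # iff it is a run of `threshold` consecutive 'A's (or 'T's).
--     # Single pass tracking the current consecutive-A and consecutive-T run
--     # lengths, with early exit.  A run of length <= 0 trivially exists.
--     if threshold <= 0:
--         return True
--     run_a = run_t = 0
--     for c in seq:
--         run_a = run_a + 1 if c == "A" else 0
--         run_t = run_t + 1 if c == "T" else 0
--         if run_a >= threshold or run_t >= threshold:
--             return True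
--     return False
-- ===== Notes on version B (the rewrite author's own statement) =====
-- stated objective: faster
-- what changed: Replaces the two sliding-window scans that count 'A'/'T' inside every length-threshold slice with one single pass over the sequence tracking the current consecutive-A and consecutive-T run lengths, returning early on a hit.
import Mathlib
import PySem

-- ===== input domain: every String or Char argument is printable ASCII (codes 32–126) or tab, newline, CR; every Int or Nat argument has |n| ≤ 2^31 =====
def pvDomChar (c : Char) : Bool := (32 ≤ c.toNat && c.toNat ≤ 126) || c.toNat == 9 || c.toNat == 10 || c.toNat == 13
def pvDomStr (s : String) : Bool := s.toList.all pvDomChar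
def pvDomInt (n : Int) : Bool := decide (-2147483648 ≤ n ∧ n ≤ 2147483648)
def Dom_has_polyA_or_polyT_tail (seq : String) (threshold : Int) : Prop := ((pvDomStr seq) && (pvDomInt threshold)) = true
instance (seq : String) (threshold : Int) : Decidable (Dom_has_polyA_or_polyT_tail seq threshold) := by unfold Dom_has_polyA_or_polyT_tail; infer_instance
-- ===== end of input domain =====

-- B replaces A's two O(n*threshold) sliding-window count scans by one O(n) pass
-- tracking the current consecutive-'A'/'T' run lengths with early exit.

-- ===== PORT A =====
-- Python's any(... for i in range(n)) iterates the range lazily and stops at the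
-- first True: ported as a short-circuiting recursion over the range's elements
def pvAnyA (f : Int → Bool) : Nat → Int → Bool
  | 0, _ => false
  | fuel + 1, i => if f i then true else pvAnyA f fuel (i + 1)

-- literal port of A: any over range(len(seq)-threshold+1) of slice-count tests, for "A" then "T"
def has_polyA_or_polyT_tail (seq : String) (threshold : Int) : Bool :=
  (pvAnyA (fun i =>
      decide (threshold ≤ (PySem.Str.count (PySem.Str.slice seq (some i) (some (i + threshold))) "A" : Int)))
    (PySem.Str.len seq - threshold + 1).toNat 0)
  ||
  (pvAnyA (fun i =>
      decide (threshold ≤ (PySem.Str.count (PySem.Str.slice seq (some i) (some (i + threshold))) "T" : Int)))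
    (PySem.Str.len seq - threshold + 1).toNat 0)

-- ===== PORT B =====
-- the for-loop of Source B with its two run counters and early return
def pvGoB (t : Nat) : List Char → Nat → Nat → Bool
  | [], _, _ => false
  | c :: rest, a, b =>
    let a' := if c = 'A' then a + 1 else 0
    let b' := if c = 'T' then b + 1 else 0
    if t ≤ a' ∨ t ≤ b' then true else pvGoB t rest a' b'

def has_polyA_or_polyT_tail_alt (seq : String) (threshold : Int) : Bool :=
  if threshold ≤ 0 then true
  else pvGoB threshold.toNat seq.toList 0 0

-- ===== PRECONDITION & SPEC =====
def Spec_has_polyA_or_polyT_tail (seq : String) (threshold : Int) (out : Bool) : Prop := out = has_polyA_or_polyT_tail_alt seq threshold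
instance (seq : String) (threshold : Int) (out : Bool) : Decidable (Spec_has_polyA_or_polyT_tail seq threshold out) := by unfold Spec_has_polyA_or_polyT_tail; infer_instance

-- ===== CLAIM (what is proved, stated in full; the proofs are below) =====
def Claim_equal_has_polyA_or_polyT_tail : Prop := ∀ (seq : String) (threshold : Int), Dom_has_polyA_or_polyT_tail seq threshold → Spec_has_polyA_or_polyT_tail seq threshold (has_polyA_or_polyT_tail seq threshold)

-- ===== LEMMAS AND PROOFS =====

-- a window of length t somewhere in l is all ch
def pvRun (t : Nat) (ch : Char) (l : List Char) : Prop :=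
  ∃ k, k + t ≤ l.length ∧ (l.drop k).take t = List.replicate t ch

-- a run of j leading ch's in l extends a carried-in run of length a to reach t
def pvCarry (t : Nat) (ch : Char) (a : Nat) (l : List Char) : Prop :=
  ∃ j, 1 ≤ j ∧ j ≤ l.length ∧ l.take j = List.replicate j ch ∧ t ≤ a + j

-- Python str.count with a single-character needle is List.count
theorem pv_count_go_single (c : Char) (s : List Char) (fuel acc : Nat) (h : s.length ≤ fuel) :
    PySem.Chars.count.go [c] fuel s acc = acc + s.count c := by
  induction s generalizing fuel acc with
  | nil => cases fuel <;> simp [PySem.Chars.count.go]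
  | cons hd tl ih =>
    cases fuel with
    | zero => simp at h
    | succ fuel =>
      simp only [List.length_cons] at h
      by_cases hc : c = hd
      · subst hc
        simp [PySem.Chars.count.go, List.isPrefixOf, ih fuel (acc + 1) (by omega),
          List.count_cons]
        omega
      · have hbeq : (c == hd) = false := by simp [hc]
        simp [PySem.Chars.count.go, List.isPrefixOf, hbeq, ih fuel acc (by omega),
          List.count_cons, Ne.symm hc]

theorem pv_count_single (s : List Char) (c : Char) :
    PySem.Chars.count s [c] = s.count c := by
  simp [PySem.Chars.count]
  simpa using pv_count_go_single c s s.length 0 le_rfl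

-- a window of length t has count ≥ t iff it is all ch
theorem pv_window_iff (w : List Char) (t : Nat) (hw : w.length = t) (ch : Char) :
    (t ≤ w.count ch) ↔ w = List.replicate t ch := by
  constructor
  · intro hle
    have hcle : w.count ch ≤ w.length := List.count_le_length
    have : w.count ch = w.length := by omega
    rw [List.eq_replicate_iff]
    exact ⟨hw, fun b hb => (List.count_eq_length.mp this b hb).symm⟩
  · intro he
    rw [he, List.count_replicate]
    simp

-- the A-side any-expression detects exactly a run of length t of ch
theorem pv_any_iff (l : List Char) (t : Nat) (ht : 1 ≤ t) (ch : Char) :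
    ((PySem.List.pyRange 0 ((l.length : Int) - (t : Int) + 1) 1).any (fun i =>
      decide ((t : Int) ≤ (PySem.Chars.count (PySem.List.slice l (some i) (some (i + t))) [ch] : Int)))) = true
    ↔ pvRun t ch l := by
  rw [List.any_eq_true]
  constructor
  · rintro ⟨i, hi, hp⟩
    rw [PySem.List.mem_pyRange_one] at hi
    obtain ⟨hi0, hilt⟩ := hi
    refine ⟨i.toNat, by omega, ?_⟩
    have hslice : PySem.List.slice l (some i) (some (i + t)) = (l.drop i.toNat).take t := by
      rw [PySem.List.slice_toNat l hi0 (by omega)]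
      congr 1
      omega
    rw [hslice, pv_count_single] at hp
    have hlen : ((l.drop i.toNat).take t).length = t := by
      simp [List.length_take, List.length_drop]
      omega
    have := (pv_window_iff _ t hlen ch).mp (by exact_mod_cast of_decide_eq_true hp)
    exact this
  · rintro ⟨k, hk, hrep⟩
    refine ⟨(k : Int), ?_, ?_⟩
    · rw [PySem.List.mem_pyRange_one]
      constructor
      · exact Int.natCast_nonneg k
      · omega
    · have hslice : PySem.List.slice l (some (k : Int)) (some ((k : Int) + t)) = (l.drop k).take t := by
        rw [PySem.List.slice_toNat l (Int.natCast_nonneg k) (by positivity)]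
        congr 1 <;> omega
      rw [hslice, pv_count_single, hrep]
      simp [List.count_replicate]

-- invariant of B's loop
theorem pv_goB_iff (t : Nat) (ht : 1 ≤ t) (l : List Char) (a b : Nat) :
    pvGoB t l a b = true ↔
      pvCarry t 'A' a l ∨ pvCarry t 'T' b l ∨ pvRun t 'A' l ∨ pvRun t 'T' l := by
  induction l generalizing a b with
  | nil =>
    simp only [pvGoB]
    constructor
    · intro h; exact absurd h (by simp)
    · rintro (⟨j, h1, h2, _, _⟩ | ⟨j, h1, h2, _, _⟩ | ⟨k, hk, _⟩ | ⟨k, hk, _⟩)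
      · simp at h2; omega
      · simp at h2; omega
      · simp at hk; omega
      · simp at hk; omega
  | cons c rest ih =>
    simp only [pvGoB]
    set a' := if c = 'A' then a + 1 else 0 with ha'
    set b' := if c = 'T' then b + 1 else 0 with hb'
    by_cases hhit : t ≤ a' ∨ t ≤ b'
    · simp only [hhit, if_true, true_iff]
      rcases hhit with h | h
      · left
        have hc : c = 'A' := by by_contra hc; simp [hc] at ha'; omega
        exact ⟨1, le_rfl, by simp, by simp [hc], by simp [ha', hc] at h; omega⟩
      · right; left
        have hc : c = 'T' := by by_contra hc; simp [hc] at hb'; omega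
        exact ⟨1, le_rfl, by simp, by simp [hc], by simp [hb', hc] at h; omega⟩
    · push_neg at hhit
      obtain ⟨hna, hnb⟩ := hhit
      rw [if_neg (by omega), ih a' b']
      constructor
      · -- from rest to c :: rest
        rintro (⟨j, hj1, hj2, hj3, hj4⟩ | ⟨j, hj1, hj2, hj3, hj4⟩ | ⟨k, hk1, hk2⟩ | ⟨k, hk1, hk2⟩)
        · by_cases hc : c = 'A'
          · left
            refine ⟨j + 1, by omega, by simp; omega, ?_, ?_⟩
            · simp [hc, List.replicate_succ, hj3]
            · simp [ha', hc] at hj4 ⊢; omega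
          · -- run reset: the j leading A's of rest reach t on their own
            right; right; left
            have htj : t ≤ j := by simp [ha', hc] at hj4; omega
            refine ⟨1, by simp; omega, ?_⟩
            have : (rest.take j).take t = List.replicate t 'A' := by
              rw [hj3, List.take_replicate, Nat.min_eq_left htj]
            simpa [List.take_take, Nat.min_eq_left htj] using this
        · by_cases hc : c = 'T'
          · right; left
            refine ⟨j + 1, by omega, by simp; omega, ?_, ?_⟩
            · simp [hc, List.replicate_succ, hj3]
            · simp [hb', hc] at hj4 ⊢; omega
          · right; right; right
            have htj : t ≤ j := by simp [hb', hc] at hj4; omega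
            refine ⟨1, by simp; omega, ?_⟩
            have : (rest.take j).take t = List.replicate t 'T' := by
              rw [hj3, List.take_replicate, Nat.min_eq_left htj]
            simpa [List.take_take, Nat.min_eq_left htj] using this
        · right; right; left; exact ⟨k + 1, by simp; omega, by simpa using hk2⟩
        · right; right; right; exact ⟨k + 1, by simp; omega, by simpa using hk2⟩
      · -- from c :: rest to rest
        rintro (⟨j, hj1, hj2, hj3, hj4⟩ | ⟨j, hj1, hj2, hj3, hj4⟩ | ⟨k, hk1, hk2⟩ | ⟨k, hk1, hk2⟩)
        · -- carried A-run through c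
          have hc : c = 'A' := by
            have := hj3
            cases j with
            | zero => omega
            | succ j' => simp [List.replicate_succ] at this; first | exact this.1 | exact this
          have ha'' : a' = a + 1 := by simp [ha', hc]
          cases j with
          | zero => omega
          | succ j' =>
            cases Nat.eq_zero_or_pos j' with
            | inl h0 => subst h0; omega
            | inr hpos =>
              left
              refine ⟨j', hpos, by simp at hj2; omega, ?_, by omega⟩
              have := hj3
              simp [hc, List.replicate_succ] at this
              first | exact this.2 | exact this
        · have hc : c = 'T' := by
            cases j with
            | zero => omega
            | succ j' => simp [List.replicate_succ] at hj3; first | exact hj3.1 | exact hj3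
          have hb'' : b' = b + 1 := by simp [hb', hc]
          cases j with
          | zero => omega
          | succ j' =>
            cases Nat.eq_zero_or_pos j' with
            | inl h0 => subst h0; omega
            | inr hpos =>
              right; left
              refine ⟨j', hpos, by simp at hj2; omega, ?_, by omega⟩
              simp [hc, List.replicate_succ] at hj3
              first | exact hj3.2 | exact hj3
        · -- an A-window inside c :: rest
          cases k with
          | succ k' => right; right; left; exact ⟨k', by simp at hk1; omega, by simpa using hk2⟩
          | zero =>
            -- window starts at c: c = 'A', its tail is t-1 leading A's of rest
            have hc : c = 'A' := by
              cases t with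
              | zero => omega
              | succ t' => simp [List.replicate_succ] at hk2; first | exact hk2.1 | exact hk2
            have ha'' : a' = a + 1 := by simp [ha', hc]
            cases t with
            | zero => omega
            | succ t' =>
              have hpos : 1 ≤ t' := by omega
              left
              refine ⟨t', hpos, by simp at hk1; omega, ?_, by omega⟩
              simp [hc, List.replicate_succ] at hk2
              first | exact hk2.2 | exact hk2
        · cases k with
          | succ k' => right; right; right; exact ⟨k', by simp at hk1; omega, by simpa using hk2⟩
          | zero =>
            have hc : c = 'T' := by
              cases t with
              | zero => omega
              | succ t' => simp [List.replicate_succ] at hk2; first | exact hk2.1 | exact hk2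
            have hb'' : b' = b + 1 := by simp [hb', hc]
            cases t with
            | zero => omega
            | succ t' =>
              have hpos : 1 ≤ t' := by omega
              right; left
              refine ⟨t', hpos, by simp at hk1; omega, ?_, by omega⟩
              simp [hc, List.replicate_succ] at hk2
              first | exact hk2.2 | exact hk2

-- with no carry, B's loop is exactly "some window of length t is all A or all T"
theorem pv_goB_zero_iff (t : Nat) (ht : 1 ≤ t) (l : List Char) :
    pvGoB t l 0 0 = true ↔ pvRun t 'A' l ∨ pvRun t 'T' l := by
  rw [pv_goB_iff t ht l 0 0]
  constructor
  · rintro (⟨j, hj1, hj2, hj3, hj4⟩ | ⟨j, hj1, hj2, hj3, hj4⟩ | h | h)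
    · left
      refine ⟨0, by simpa using by omega, ?_⟩
      simp only [List.drop_zero]
      have : (l.take j).take t = List.replicate t 'A' := by
        rw [hj3, List.take_replicate, Nat.min_eq_left (by omega)]
      simpa [List.take_take, Nat.min_eq_left (show t ≤ j by omega)] using this
    · right
      refine ⟨0, by simpa using by omega, ?_⟩
      simp only [List.drop_zero]
      have : (l.take j).take t = List.replicate t 'T' := by
        rw [hj3, List.take_replicate, Nat.min_eq_left (by omega)]
      simpa [List.take_take, Nat.min_eq_left (show t ≤ j by omega)] using this
    · left; exact h
    · right; exact h
  · rintro (h | h)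
    · right; right; left; exact h
    · right; right; right; exact h

-- the short-circuiting range iteration is List.any over the materialized range
theorem pvAnyA_eq_any_range (f : Int → Bool) (fuel : Nat) (i : Int) :
    pvAnyA f fuel i = ((PySem.List.pyRange i (i + (fuel : Int)) 1).any f) := by
  induction fuel generalizing i with
  | zero => simp [pvAnyA]
  | succ n ih =>
    rw [PySem.List.pyRange_one_cons (by omega)]
    simp only [List.any_cons]
    cases hfi : f i with
    | true => simp [pvAnyA, hfi]
    | false =>
      simp only [pvAnyA, hfi, Bool.false_or]
      rw [show i + ((n + 1 : Nat) : Int) = (i + 1) + (n : Int) by push_cast; ring]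
      exact ih (i + 1)

theorem pv_pyRange_toNat (m : Int) :
    PySem.List.pyRange 0 (0 + ((m.toNat : Nat) : Int)) 1 = PySem.List.pyRange 0 m 1 := by
  have h : ((0 + ((m.toNat : Nat) : Int)) - 0).toNat = (m - 0).toNat := by omega
  rw [PySem.List.pyRange_one, PySem.List.pyRange_one, h]

-- the A-side slice/count written on the list side
theorem pv_A_unfold (seq : String) (threshold : Int) :
    has_polyA_or_polyT_tail seq threshold =
    (((PySem.List.pyRange 0 ((seq.toList.length : Int) - threshold + 1) 1).any (fun i =>
        decide (threshold ≤ (PySem.Chars.count (PySem.List.slice seq.toList (some i) (some (i + threshold))) ['A'] : Int))))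
     ||
     ((PySem.List.pyRange 0 ((seq.toList.length : Int) - threshold + 1) 1).any (fun i =>
        decide (threshold ≤ (PySem.Chars.count (PySem.List.slice seq.toList (some i) (some (i + threshold))) ['T'] : Int))))) := by
  have hA : "A".toList = ['A'] := rfl
  have hT : "T".toList = ['T'] := rfl
  simp only [has_polyA_or_polyT_tail, PySem.Str.len_eq, PySem.Str.count_eq,
    PySem.Str.toList_slice, PySem.Chars.slice_eq_listSlice, hA, hT, pvAnyA_eq_any_range,
    pv_pyRange_toNat]

-- ===== VERDICT (by name: the statement is the Claim_ definition above) =====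
theorem has_polyA_or_polyT_tail_spec : Claim_equal_has_polyA_or_polyT_tail := by
  intro seq threshold _
  unfold Spec_has_polyA_or_polyT_tail
  rw [pv_A_unfold]
  unfold has_polyA_or_polyT_tail_alt
  by_cases hle : threshold ≤ 0
  · -- both sides are true: A's first window test at i = 0 already holds
    rw [if_pos hle]
    have h0 : (0 : Int) ∈ PySem.List.pyRange 0 ((seq.toList.length : Int) - threshold + 1) 1 := by
      rw [PySem.List.mem_pyRange_one]
      constructor
      · exact le_refl 0
      · have : (0 : Int) ≤ (seq.toList.length : Int) := Int.natCast_nonneg _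
        omega
    have hp : decide (threshold ≤ (PySem.Chars.count (PySem.List.slice seq.toList (some 0) (some (0 + threshold))) ['A'] : Int)) = true := by
      apply decide_eq_true
      have : (0 : Int) ≤ (PySem.Chars.count (PySem.List.slice seq.toList (some 0) (some (0 + threshold))) ['A'] : Int) := Int.natCast_nonneg _
      omega
    have : (PySem.List.pyRange 0 ((seq.toList.length : Int) - threshold + 1) 1).any (fun i =>
        decide (threshold ≤ (PySem.Chars.count (PySem.List.slice seq.toList (some i) (some (i + threshold))) ['A'] : Int))) = true := by
      rw [List.any_eq_true]; exact ⟨0, h0, hp⟩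
    rw [this, Bool.true_or]
  · rw [if_neg hle]
    push_neg at hle
    set t : Nat := threshold.toNat with htdef
    have htc : (t : Int) = threshold := Int.toNat_of_nonneg (by omega)
    have ht1 : 1 ≤ t := by omega
    rw [← htc, Bool.eq_iff_iff]
    simp only [Bool.or_eq_true]
    rw [pv_any_iff seq.toList t ht1 'A', pv_any_iff seq.toList t ht1 'T',
        pv_goB_zero_iff t ht1 seq.toList]
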